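-- pv_equiv track=rewrite | github.com/Arsen1302/Code-copy-detector | TestData/solutions/problem_413_3.py | solution_413_3
-- ===== SOURCE A (Python) =====
-- from typing import List
--
-- def solution_413_3(nums: List[int]) -> int:
--     if nums == []:
--         return 0
--     dic = {}
--     for n in nums:
--         if n not in dic:
--             dic[n] = 1
--         else:
--             dic[n] += 1
--     degree = max(dic.values())
--     if degree == 1:
--         return 1
--     else:
--         min_length = len(nums)
--         for keys in dic:
--             if dic[keys] == degree:
--                 pos1 = nums.index(keys)
--                 pos2 = len(nums) -nums[::-1].index(keys) - 1
--                 if pos2 - pos1 + 1 < min_length: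
--                     min_length = pos2 - pos1 + 1
--     return min_length
-- ===== SOURCE B (Python) =====
-- from typing import List
--
-- def solution_413_3(nums: List[int]) -> int:
--     # One-pass online algorithm: maintain per-value first index and running count,
--     # and update the running (degree, answer) pair as the scan proceeds.
--     first = {}
--     count = {}
--     degree = 0
--     ans = 0
--     for i, n in enumerate(nums):
--         if n not in first:
--             first[n] = i
--         c = count.get(n, 0) + 1
--         count[n] = c
--         span = i - first[n] + 1
--         if c > degree:
--             degree = c
--             ans = span
--         elif c == degree and span < ans:
--             ans = span
--     return ans
-- ===== Notes on version B (the rewrite author's own statement) =====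
-- stated objective: alternative
-- what changed: B replaces A's two-stage count-then-scan (counting dict, then per-max-count-key nums.index and reversed-list rescans) by an online single pass that maintains a running degree and running minimal span, updating/resetting the answer as each element arrives.
import Mathlib
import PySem

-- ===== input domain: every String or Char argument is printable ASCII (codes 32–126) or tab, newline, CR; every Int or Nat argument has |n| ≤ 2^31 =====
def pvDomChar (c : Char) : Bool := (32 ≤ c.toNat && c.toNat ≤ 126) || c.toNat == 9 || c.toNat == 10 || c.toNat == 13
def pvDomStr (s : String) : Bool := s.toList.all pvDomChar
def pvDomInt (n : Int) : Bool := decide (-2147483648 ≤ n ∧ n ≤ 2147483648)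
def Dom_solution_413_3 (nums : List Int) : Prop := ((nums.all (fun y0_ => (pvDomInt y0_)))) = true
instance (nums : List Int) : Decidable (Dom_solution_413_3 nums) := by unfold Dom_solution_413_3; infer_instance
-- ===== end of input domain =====

-- B replaces A's two-stage count-then-scan (counting dict, then per-max-count-key nums.index and
-- reversed-list rescans) by an online single pass maintaining a running degree and a running
-- minimal span; objective: alternative algorithm.

-- ===== PORT A =====
-- .getD 0 / .getD [] below only totalize index?/slice? at points proved unreachable (the key is in nums).
def solution_413_3 (nums : List Int) : Int :=
  if nums == [] then 0
  else
    let dic : PySem.Dict Int Int := nums.foldl (fun d n =>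
      if d.contains n = false then d.insert n 1 else d.insert n (d.getD n 0 + 1))
      PySem.Dict.empty
    match PySem.List.max? dic.values (fun v => v) with
    | none => 0
    | some degree =>
      if degree == 1 then 1
      else
        dic.keys.foldl (fun min_length k =>
          if dic.getD k 0 == degree then
            let pos1 : Int := (((PySem.List.index? nums k).getD 0 : Nat) : Int)
            let pos2 : Int := (nums.length : Int)
              - (((PySem.List.index? ((PySem.List.slice? nums none none (-1)).getD []) k).getD 0 : Nat) : Int) - 1
            if pos2 - pos1 + 1 < min_length then pos2 - pos1 + 1 else min_length
          else min_length) (nums.length : Int)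

-- ===== PORT B =====
-- state: (first-index dict, count dict, running degree, running answer)
def pvStepB (st : PySem.Dict Int Int × PySem.Dict Int Int × Int × Int) (p : Int × Int) :
    PySem.Dict Int Int × PySem.Dict Int Int × Int × Int :=
  let i := p.1
  let n := p.2
  let first := if st.1.contains n then st.1 else st.1.insert n i
  let c := st.2.1.getD n 0 + 1
  let count := st.2.1.insert n c
  let span := i - first.getD n 0 + 1
  if c > st.2.2.1 then (first, count, c, span)
  else if c = st.2.2.1 ∧ span < st.2.2.2 then (first, count, st.2.2.1, span)
  else (first, count, st.2.2.1, st.2.2.2)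

def solution_413_3_alt (nums : List Int) : Int :=
  ((PySem.List.enumerate nums 0).foldl pvStepB
    (PySem.Dict.empty, PySem.Dict.empty, 0, 0)).2.2.2

-- ===== PRECONDITION & SPEC =====
def Spec_solution_413_3 (nums : List Int) (out : Int) : Prop := out = solution_413_3_alt nums
instance (nums : List Int) (out : Int) : Decidable (Spec_solution_413_3 nums out) := by unfold Spec_solution_413_3; infer_instance

-- ===== CLAIM (what is proved, stated in full; the proofs are below) =====
def Claim_equal_solution_413_3 : Prop := ∀ (nums : List Int), Dom_solution_413_3 nums → Spec_solution_413_3 nums (solution_413_3 nums)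

-- ===== LEMMAS AND PROOFS =====

def pvFirstIdx (l : List Int) (k : Int) : Int := (((PySem.List.index? l k).getD 0 : Nat) : Int)
def pvLastIdx (l : List Int) (k : Int) : Int :=
  (l.length : Int) - (((PySem.List.index? l.reverse k).getD 0 : Nat) : Int) - 1
def pvSpan (l : List Int) (k : Int) : Int := pvLastIdx l k - pvFirstIdx l k + 1
def pvCnt (l : List Int) (k : Int) : Int := ((l.count k : Nat) : Int)

def GoodD (l : List Int) (D : Int) : Prop :=
  (∀ k ∈ l, pvCnt l k ≤ D) ∧ (∃ k ∈ l, pvCnt l k = D)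
def GoodR (l : List Int) (D r : Int) : Prop :=
  (∀ k ∈ l, pvCnt l k = D → r ≤ pvSpan l k) ∧ (∃ k ∈ l, pvCnt l k = D ∧ pvSpan l k = r)

theorem goodD_unique {l : List Int} {D1 D2 : Int} (h1 : GoodD l D1) (h2 : GoodD l D2) :
    D1 = D2 := by
  obtain ⟨le1, k1, hk1, hc1⟩ := h1
  obtain ⟨le2, k2, hk2, hc2⟩ := h2
  have := le1 k2 hk2
  have := le2 k1 hk1
  omega

theorem goodR_unique {l : List Int} {D r1 r2 : Int} (h1 : GoodR l D r1) (h2 : GoodR l D r2) :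
    r1 = r2 := by
  obtain ⟨le1, k1, hk1, hc1, hs1⟩ := h1
  obtain ⟨le2, k2, hk2, hc2, hs2⟩ := h2
  have := le1 k2 hk2 hc2
  have := le2 k1 hk1 hc1
  omega

-- ---- index lemmas (append on the right) ----

theorem pvFirstIdx_append_mem {k : Int} (p : List Int) (x : Int) (hm : k ∈ p) :
    pvFirstIdx (p ++ [x]) k = pvFirstIdx p k := by
  rw [pvFirstIdx, pvFirstIdx, PySem.List.index?_append_of_mem _ hm]

theorem pvFirstIdx_append_self (p : List Int) (x : Int) (hx : x ∉ p) :
    pvFirstIdx (p ++ [x]) x = (p.length : Int) := by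
  rw [pvFirstIdx, PySem.List.index?_append_singleton_self p x hx]
  simp

theorem pvLastIdx_append_self (p : List Int) (x : Int) :
    pvLastIdx (p ++ [x]) x = (p.length : Int) := by
  rw [pvLastIdx, List.reverse_append, List.reverse_singleton, List.singleton_append,
    PySem.List.index?_cons_self]
  simp

theorem pvLastIdx_append_ne {k : Int} (p : List Int) (x : Int) (h : k ≠ x) (hm : k ∈ p) :
    pvLastIdx (p ++ [x]) k = pvLastIdx p k := by
  obtain ⟨j, hj⟩ := Option.isSome_iff_exists.mp
    ((PySem.List.index?_isSome_iff p.reverse k).mpr (by simpa using hm))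
  rw [pvLastIdx, pvLastIdx, List.reverse_append, List.reverse_singleton, List.singleton_append,
    PySem.List.index?_cons_of_ne _ (Ne.symm h), hj]
  simp

theorem pvCnt_append_ne {k : Int} (p : List Int) (x : Int) (h : k ≠ x) :
    pvCnt (p ++ [x]) k = pvCnt p k := by
  simp [pvCnt, List.count_append, Ne.symm h]

theorem pvCnt_append_self (p : List Int) (x : Int) :
    pvCnt (p ++ [x]) x = pvCnt p x + 1 := by
  simp [pvCnt, List.count_append]

theorem pvSpan_append_ne {k : Int} (p : List Int) (x : Int) (h : k ≠ x) (hm : k ∈ p) :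
    pvSpan (p ++ [x]) k = pvSpan p k := by
  rw [pvSpan, pvSpan, pvLastIdx_append_ne p x h hm, pvFirstIdx_append_mem p x hm]

theorem lastIdx_eq_firstIdx_of_count_one {l : List Int} {k : Int} (h : l.count k = 1) :
    pvLastIdx l k = pvFirstIdx l k := by
  have hm : k ∈ l := by
    by_contra hc
    rw [List.count_eq_zero.mpr hc] at h
    omega
  obtain ⟨i, hi⟩ := Option.isSome_iff_exists.mp ((PySem.List.index?_isSome_iff l k).mpr hm)
  obtain ⟨pre, suf, hl, hlen, hpre⟩ := (PySem.List.index?_eq_some_iff l k i).mp hi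
  have hcpre : pre.count k = 0 := List.count_eq_zero.mpr hpre
  have hsuf : k ∉ suf := by
    subst hl
    simp [List.count_append, hcpre] at h
    exact List.count_eq_zero.mp (by omega)
  have hrev : PySem.List.index? l.reverse k = some suf.reverse.length :=
    (PySem.List.index?_eq_some_iff _ _ _).mpr
      ⟨suf.reverse, pre.reverse, by simp [hl], rfl, by simpa using hsuf⟩
  rw [pvLastIdx, pvFirstIdx, hrev, hi]
  subst hl
  simp
  omega

theorem span_le (l : List Int) (k : Int) :
    pvSpan l k ≤ (l.length : Int) := by
  simp [pvSpan, pvLastIdx, pvFirstIdx]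
  omega

-- ---- A-side characterization ----

theorem dicA_eq (l : List Int) :
    l.foldl (fun d n => if d.contains n = false then d.insert n 1 else d.insert n (d.getD n 0 + 1))
      PySem.Dict.empty = PySem.Dict.counter l := by
  have hf : (fun (d : PySem.Dict Int Int) n =>
      if d.contains n = false then d.insert n 1 else d.insert n (d.getD n 0 + 1))
      = fun d n => d.insert n (d.getD n 0 + 1) := by
    funext d n
    by_cases h : d.contains n
    · simp [h]
    · have h' : d.contains n = false := by simpa using h
      simp [h', PySem.Dict.getD_of_not_contains]
  rw [hf, PySem.Dict.foldl_insert_getD_add_one_eq_counter]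

theorem foldl_min_filter_map (l : List Int) (p : Int → Bool) (g : Int → Int) (init : Int) :
    l.foldl (fun m k => if p k then (if g k < m then g k else m) else m) init
      = ((l.filter p).map g).foldl (fun m v => if v < m then v else m) init := by
  induction l generalizing init with
  | nil => rfl
  | cons a l ih => by_cases h : p a <;> simp [h, ih]

theorem foldl_if_lt_eq_foldl_min (xs : List Int) (init : Int) :
    xs.foldl (fun m v => if v < m then v else m) init = xs.foldl min init := by
  have hf : (fun (m v : Int) => if v < m then v else m) = min := by
    funext m v
    simp [min_def]
    split_ifs <;> omega
  rw [hf]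

theorem foldl_min_le_init (xs : List Int) (init : Int) : xs.foldl min init ≤ init := by
  induction xs generalizing init with
  | nil => simp
  | cons a xs ih => exact le_trans (ih (min init a)) (min_le_left _ _)

theorem foldl_min_le_mem {v : Int} {xs : List Int} (init : Int) (h : v ∈ xs) :
    xs.foldl min init ≤ v := by
  induction xs generalizing init with
  | nil => simp at h
  | cons a xs ih =>
    rcases List.mem_cons.mp h with rfl | h
    · exact le_trans (foldl_min_le_init xs _) (min_le_right _ _)
    · exact ih _ h

theorem foldl_min_mem (xs : List Int) (init : Int) :
    xs.foldl min init = init ∨ xs.foldl min init ∈ xs := by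
  induction xs generalizing init with
  | nil => simp
  | cons a xs ih =>
    rcases ih (min init a) with h | h
    · by_cases hle : init ≤ a
      · left; rw [List.foldl_cons, h, min_eq_left hle]
      · right; rw [List.foldl_cons, h, min_eq_right (by omega)]; simp
    · right; simp [h]

theorem A_char (l : List Int) (h : l ≠ []) :
    ∃ D, GoodD l D ∧ GoodR l D (solution_413_3 l) := by
  have hlne : (l == ([] : List Int)) = false := by simpa using h
  have hvalsA : (PySem.Dict.counter l).values
      = (PySem.Set.ofList l).map (fun k => pvCnt l k) := by
    simp [PySem.Dict.values, PySem.Dict.items_counter, List.map_map, Function.comp_def, pvCnt]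
  simp only [solution_413_3, dicA_eq, hlne, hvalsA, PySem.Dict.keys_counter,
    Bool.false_eq_true, if_false]
  obtain ⟨y, hy⟩ := List.exists_mem_of_ne_nil l h
  cases hdeg : PySem.List.max? ((PySem.Set.ofList l).map (fun k => pvCnt l k)) (fun v => v) with
  | none =>
    have := (PySem.List.max?_eq_none_iff _ _).mp hdeg
    simp at this
    exact absurd ((PySem.Set.mem_ofList _ _).mpr hy) (by simp [this])
  | some degree =>
    simp only []
    have hle : ∀ k ∈ l, pvCnt l k ≤ degree := by
      intro k hk
      exact PySem.List.max?_isMax hdeg _ (List.mem_map_of_mem ((PySem.Set.mem_ofList _ _).mpr hk))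
    have hmem : ∃ k ∈ l, pvCnt l k = degree := by
      have hm := PySem.List.max?_mem hdeg
      obtain ⟨k, hk, hck⟩ := List.mem_map.mp hm
      exact ⟨k, (PySem.Set.mem_ofList _ _).mp hk, hck⟩
    refine ⟨degree, ⟨hle, hmem⟩, ?_⟩
    by_cases hd1 : degree = 1
    · subst hd1
      simp only [BEq.rfl, if_true]
      have hsp : ∀ k ∈ l, pvCnt l k = 1 → pvSpan l k = 1 := by
        intro k hk hck
        have : l.count k = 1 := by simp [pvCnt] at hck; omega
        rw [pvSpan, lastIdx_eq_firstIdx_of_count_one this]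
        ring
      obtain ⟨k0, hk0, hck0⟩ := hmem
      exact ⟨fun k hk hck => le_of_eq (hsp k hk hck).symm, k0, hk0, hck0, hsp k0 hk0 hck0⟩
    · have hd1' : (degree == (1 : Int)) = false := by simpa using hd1
      rw [hd1']
      simp only [Bool.false_eq_true, if_false]
      have hbody : (fun (min_length : Int) (k : Int) =>
          if ((PySem.Dict.counter l).getD k 0 == degree) = true then
            if (l.length : Int) - (((PySem.List.index? ((PySem.List.slice? l none none (-1)).getD []) k).getD 0 : Nat) : Int) - 1 -
                  (((PySem.List.index? l k).getD 0 : Nat) : Int) + 1 < min_length then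
              (l.length : Int) - (((PySem.List.index? ((PySem.List.slice? l none none (-1)).getD []) k).getD 0 : Nat) : Int) - 1 -
                  (((PySem.List.index? l k).getD 0 : Nat) : Int) + 1
            else min_length
          else min_length)
          = fun (m : Int) (k : Int) =>
            if (pvCnt l k == degree)
            then (if pvSpan l k < m then pvSpan l k else m)
            else m := by
        funext m k
        simp only [PySem.Dict.getD_counter, PySem.List.slice?_none_none_neg_one,
          Option.getD_some, pvCnt, pvSpan, pvFirstIdx, pvLastIdx]
      rw [hbody, foldl_min_filter_map, foldl_if_lt_eq_foldl_min]
      set spans := (((PySem.Set.ofList l).filter (fun k => pvCnt l k == degree)).map (pvSpan l)) with hspans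
      have hin : ∀ k ∈ l, pvCnt l k = degree → pvSpan l k ∈ spans := by
        intro k hk hck
        exact List.mem_map_of_mem (List.mem_filter.mpr
          ⟨(PySem.Set.mem_ofList _ _).mpr hk, by simp [hck]⟩)
      refine ⟨fun k hk hck => foldl_min_le_mem _ (hin k hk hck), ?_⟩
      obtain ⟨k0, hk0, hck0⟩ := hmem
      rcases foldl_min_mem spans (l.length : Int) with hr | hr
      · refine ⟨k0, hk0, hck0, ?_⟩
        have h1 := foldl_min_le_mem ((l.length : Int)) (hin k0 hk0 hck0)
        have h2 := span_le l k0
        omega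
      · obtain ⟨k1, hk1, hsk1⟩ := List.mem_map.mp hr
        obtain ⟨hk1s, hck1⟩ := List.mem_filter.mp hk1
        exact ⟨k1, (PySem.Set.mem_ofList _ _).mp hk1s, by simpa using hck1, hsk1⟩

-- ---- B-side invariant ----

def pvInv (p : List Int) (st : PySem.Dict Int Int × PySem.Dict Int Int × Int × Int) : Prop :=
  (∀ k, st.1.get? k = if k ∈ p then some (pvFirstIdx p k) else none) ∧
  (∀ k, st.2.1.get? k = if k ∈ p then some (pvCnt p k) else none) ∧
  (p = [] → st.2.2.1 = 0 ∧ st.2.2.2 = 0) ∧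
  (p ≠ [] → GoodD p st.2.2.1 ∧ GoodR p st.2.2.1 st.2.2.2)

theorem pvInv_step (p : List Int) (x : Int) (st : PySem.Dict Int Int × PySem.Dict Int Int × Int × Int)
    (h : pvInv p st) : pvInv (p ++ [x]) (pvStepB st ((p.length : Int), x)) := by
  obtain ⟨hf, hc, hnil, hcons⟩ := h
  have hqne : p ++ [x] ≠ [] := by simp
  have hmemq : ∀ k : Int, k ∈ p ++ [x] ↔ k ∈ p ∨ k = x := by
    intro k; simp [List.mem_append]
  -- the updated first-occurrence dict
  have hfirst' : ∀ k, (if st.1.contains x = true then st.1 else st.1.insert x ((p.length : Int))).get? k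
      = if k ∈ p ++ [x] then some (pvFirstIdx (p ++ [x]) k) else none := by
    intro k
    by_cases hxp : x ∈ p
    · have : st.1.contains x = true := by
        rw [PySem.Dict.contains_eq_isSome_get?, hf x]; simp [hxp]
      rw [if_pos this, hf k]
      by_cases hk : k ∈ p
      · rw [if_pos hk, if_pos ((hmemq k).mpr (Or.inl hk)), pvFirstIdx_append_mem p x hk]
      · rw [if_neg hk, if_neg (by
          intro hm
          rcases (hmemq k).mp hm with h' | h'
          · exact hk h'
          · exact hk (h' ▸ hxp))]
    · have : st.1.contains x = false := by
        rw [PySem.Dict.contains_eq_isSome_get?, hf x]; simp [hxp]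
      rw [if_neg (by simp [this])]
      by_cases hkx : k = x
      · subst hkx
        rw [PySem.Dict.get?_insert_self, if_pos ((hmemq k).mpr (Or.inr rfl)),
          pvFirstIdx_append_self p k hxp]
      · rw [PySem.Dict.get?_insert_of_ne _ _ hkx, hf k]
        by_cases hk : k ∈ p
        · rw [if_pos hk, if_pos ((hmemq k).mpr (Or.inl hk)), pvFirstIdx_append_mem p x hk]
        · rw [if_neg hk, if_neg (by
            intro hm
            rcases (hmemq k).mp hm with h' | h'
            · exact hk h'
            · exact hkx h')]
  -- the new count of x
  have hcx : st.2.1.getD x 0 + 1 = pvCnt (p ++ [x]) x := by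
    rw [PySem.Dict.getD_eq_get?_getD, hc x, pvCnt_append_self]
    by_cases hxp : x ∈ p
    · simp [hxp]
    · have : p.count x = 0 := List.count_eq_zero.mpr hxp
      simp [hxp, pvCnt, this]
  -- the updated count dict
  have hcount' : ∀ k, (st.2.1.insert x (st.2.1.getD x 0 + 1)).get? k
      = if k ∈ p ++ [x] then some (pvCnt (p ++ [x]) k) else none := by
    intro k
    by_cases hkx : k = x
    · subst hkx
      rw [PySem.Dict.get?_insert_self, if_pos ((hmemq k).mpr (Or.inr rfl)), hcx]
    · rw [PySem.Dict.get?_insert_of_ne _ _ hkx, hc k]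
      by_cases hk : k ∈ p
      · rw [if_pos hk, if_pos ((hmemq k).mpr (Or.inl hk)), pvCnt_append_ne p x hkx]
      · rw [if_neg hk, if_neg (by
          intro hm
          rcases (hmemq k).mp hm with h' | h'
          · exact hk h'
          · exact hkx h')]
  -- the recorded span of x
  have hgetDx : (if st.1.contains x = true then st.1 else st.1.insert x ((p.length : Int))).getD x 0
      = pvFirstIdx (p ++ [x]) x := by
    rw [PySem.Dict.getD_eq_get?_getD, hfirst' x, if_pos ((hmemq x).mpr (Or.inr rfl))]
    rfl
  have hspanx : ((p.length : Int)) - pvFirstIdx (p ++ [x]) x + 1 = pvSpan (p ++ [x]) x := by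
    rw [pvSpan, pvLastIdx_append_self]
  -- counts of old elements are unchanged
  have hcold : ∀ k ∈ p, k ≠ x → pvCnt (p ++ [x]) k = pvCnt p k := fun k _ hk => pvCnt_append_ne p x hk
  have hcnonneg : 0 ≤ st.2.1.getD x 0 := by
    rw [PySem.Dict.getD_eq_get?_getD, hc x]
    by_cases hxp : x ∈ p <;> simp [hxp, pvCnt]
  simp only [pvStepB, pvInv]
  set fst : PySem.Dict Int Int := (if st.1.contains x = true then st.1 else st.1.insert x ((p.length : Int))) with hfst
  split_ifs with h1 h2
  -- branch 1: new record degree c, answer reset to x's span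
  · refine ⟨hfirst', hcount', fun hq => absurd hq hqne, fun _ => ?_⟩
    dsimp only
    rw [hgetDx, hcx, hspanx]
    have hbound : ∀ k ∈ p ++ [x], pvCnt (p ++ [x]) k ≤ pvCnt (p ++ [x]) x := by
      intro k hk
      by_cases hkx : k = x
      · subst hkx; exact le_refl _
      · have hkp : k ∈ p := by
          rcases (hmemq k).mp hk with h' | h'
          · exact h'
          · exact absurd h' hkx
        have hpne : p ≠ [] := List.ne_nil_of_mem hkp
        have hD := (hcons hpne).1.1 k hkp
        rw [hcold k hkp hkx]
        omega
    refine ⟨⟨hbound, x, (hmemq x).mpr (Or.inr rfl), rfl⟩, ?_, x, (hmemq x).mpr (Or.inr rfl), rfl, rfl⟩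
    intro k hk hck
    by_cases hkx : k = x
    · subst hkx; exact le_refl _
    · exfalso
      have hkp : k ∈ p := by
        rcases (hmemq k).mp hk with h' | h'
        · exact h'
        · exact absurd h' hkx
      have hpne : p ≠ [] := List.ne_nil_of_mem hkp
      have hD := (hcons hpne).1.1 k hkp
      rw [hcold k hkp hkx] at hck
      omega
  -- branch 2: tie with a strictly smaller span
  · obtain ⟨hceq, hlt⟩ := h2
    rw [hgetDx] at hlt ⊢
    have hpne : p ≠ [] := by
      intro hp
      subst hp
      have := (hnil rfl).1
      omega
    obtain ⟨⟨hDle, -⟩, hRle, k1, hk1, hck1, hsk1⟩ := hcons hpne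
    refine ⟨hfirst', hcount', fun hq => absurd hq hqne, fun _ => ?_⟩
    dsimp only
    have hbound : ∀ k ∈ p ++ [x], pvCnt (p ++ [x]) k ≤ st.2.2.1 := by
      intro k hk
      by_cases hkx : k = x
      · subst hkx; rw [← hcx, hceq]
      · have hkp : k ∈ p := by
          rcases (hmemq k).mp hk with h' | h'
          · exact h'
          · exact absurd h' hkx
        rw [hcold k hkp hkx]
        exact hDle k hkp
    refine ⟨⟨hbound, x, (hmemq x).mpr (Or.inr rfl), by rw [← hcx, hceq]⟩, ?_,
      x, (hmemq x).mpr (Or.inr rfl), by rw [← hcx, hceq], hspanx.symm⟩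
    intro k hk hck
    by_cases hkx : k = x
    · subst hkx; rw [hspanx]
    · have hkp : k ∈ p := by
        rcases (hmemq k).mp hk with h' | h'
        · exact h'
        · exact absurd h' hkx
      rw [hcold k hkp hkx] at hck
      have := hRle k hkp hck
      rw [pvSpan_append_ne p x hkx hkp]
      omega
  -- branch 3: nothing improves; degree and answer unchanged
  · have hpne : p ≠ [] := by
      intro hp
      subst hp
      have := (hnil rfl).1
      omega
    obtain ⟨⟨hDle, k0, hk0, hck0⟩, hRle, k1, hk1, hck1, hsk1⟩ := hcons hpne
    have hk0x : k0 ≠ x := by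
      intro he
      subst he
      have : st.2.1.getD k0 0 = pvCnt p k0 := by
        rw [PySem.Dict.getD_eq_get?_getD, hc k0]; simp [hk0]
      omega
    have hk1x : k1 ≠ x := by
      intro he
      subst he
      have : st.2.1.getD k1 0 = pvCnt p k1 := by
        rw [PySem.Dict.getD_eq_get?_getD, hc k1]; simp [hk1]
      omega
    refine ⟨hfirst', hcount', fun hq => absurd hq hqne, fun _ => ?_⟩
    dsimp only
    have hbound : ∀ k ∈ p ++ [x], pvCnt (p ++ [x]) k ≤ st.2.2.1 := by
      intro k hk
      by_cases hkx : k = x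
      · subst hkx; rw [← hcx]; omega
      · have hkp : k ∈ p := by
          rcases (hmemq k).mp hk with h' | h'
          · exact h'
          · exact absurd h' hkx
        rw [hcold k hkp hkx]
        exact hDle k hkp
    refine ⟨⟨hbound, k0, (hmemq k0).mpr (Or.inl hk0), by rw [hcold k0 hk0 hk0x]; exact hck0⟩, ?_,
      k1, (hmemq k1).mpr (Or.inl hk1), by rw [hcold k1 hk1 hk1x]; exact hck1,
      by rw [pvSpan_append_ne p x hk1x hk1]; exact hsk1⟩
    intro k hk hck
    by_cases hkx : k = x
    · rw [hkx] at hck ⊢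
      rw [← hcx] at hck
      rw [hgetDx, hspanx] at h2
      have hge : ¬ (pvSpan (p ++ [x]) x < st.2.2.2) := fun hh => h2 ⟨hck, hh⟩
      omega
    · have hkp : k ∈ p := by
        rcases (hmemq k).mp hk with h' | h'
        · exact h'
        · exact absurd h' hkx
      rw [hcold k hkp hkx] at hck
      rw [pvSpan_append_ne p x hkx hkp]
      exact hRle k hkp hck

theorem pvInv_foldl (l : List Int) :
    pvInv l ((PySem.List.enumerate l 0).foldl pvStepB
      (PySem.Dict.empty, PySem.Dict.empty, 0, 0)) := by
  induction l using List.reverseRecOn with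
  | nil =>
    refine ⟨?_, ?_, fun _ => ⟨rfl, rfl⟩, fun hc => absurd rfl hc⟩ <;>
      intro k <;> simp [PySem.List.enumerate_nil, PySem.Dict.get?_empty]
  | append_singleton p x ih =>
    have he : PySem.List.enumerate (p ++ [x]) 0
        = PySem.List.enumerate p 0 ++ [((p.length : Int), x)] := by
      rw [PySem.List.enumerate_append]
      simp
    rw [he, List.foldl_append, List.foldl_cons, List.foldl_nil]
    exact pvInv_step p x _ ih

theorem B_char (l : List Int) (h : l ≠ []) :
    ∃ D, GoodD l D ∧ GoodR l D (solution_413_3_alt l) := by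
  have hi := pvInv_foldl l
  obtain ⟨-, -, -, hg⟩ := hi
  obtain ⟨hd, hr⟩ := hg h
  exact ⟨_, hd, hr⟩

theorem main_thm (nums : List Int) : solution_413_3 nums = solution_413_3_alt nums := by
  cases hn : nums with
  | nil => decide
  | cons y t =>
    rw [← hn]
    have hne : nums ≠ [] := by simp [hn]
    obtain ⟨D1, hd1, hr1⟩ := A_char nums hne
    obtain ⟨D2, hd2, hr2⟩ := B_char nums hne
    have hD : D1 = D2 := goodD_unique hd1 hd2
    subst hD
    exact goodR_unique hr1 hr2

-- ===== VERDICT (by name: the statement is the Claim_ definition above) =====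
theorem solution_413_3_spec : Claim_equal_solution_413_3 := by
  unfold Claim_equal_solution_413_3
  intro nums _
  exact main_thm nums
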